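-- pv_equiv track=rewrite | github.com/hyunjongkimmath/trouver | trouver/helper/latex/__init__.py | _has_double_script
-- ===== SOURCE A (Python) =====
-- def _has_double_script(
--         latex_string: str
--         ) -> bool:
--     """
--     Return `True` if there is at least one double superscript
--     or double subscript in `latex_string`
--
--     This function fails to give correct outputs for more
--     nuanced texts, such as `r"x^{2}_{3}^{4}"`; while in
--     principle, the function should return `True` on this
--     input, the actual return value is `False`.
--
--     This is a helper function of `math_mode_string_is_syntactically_valid`
--     """
--     # Remove all whitespace from the string
--     latex_string = ''.join(latex_string.split())
--
--     # Function to match balanced braces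
--     def match_braces(s, start):
--         count = 0
--         for i, char in enumerate(s[start:], start):
--             if char == '{':
--                 count += 1
--             elif char == '}':
--                 count -= 1
--                 if count == 0:
--                     return i
--         return len(s) - 1
--
--     # Find all subscripts and superscripts
--     i = 0
--     last_script = None
--     while i < len(latex_string):
--         if latex_string[i] in '^_' and (i == 0 or latex_string[i-1] != '\\'):
--             current_script = latex_string[i]
--             i += 1
--             if i < len(latex_string):
--                 if latex_string[i] == '{':
--                     end = match_braces(latex_string, i)
--                     script_content = latex_string[i:end+1]
--                     i = end + 1
--                 else:
--                     script_content = latex_string[i]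
--                     i += 1
--
--                 if last_script and last_script[0] == current_script:
--                     return True
--                 last_script = (current_script, script_content)
--         else:
--             if latex_string[i] not in '^_':
--                 last_script = None
--             i += 1
--
--     return False
-- ===== SOURCE B (Python) =====
-- def _has_double_script(
--         latex_string: str
--         ) -> bool:
--     """Two-phase re-implementation: tokenize the whitespace-stripped string
--     into script events ('^'/'_') and reset markers, then scan the event list
--     for two consecutive same-type script events."""
--     s = ''.join(latex_string.split())
--     n = len(s)
--
--     def match_braces(s, start):
--         depth = 0
--         j = start
--         while j < len(s):
--             if s[j] == '{':
--                 depth += 1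
--             elif s[j] == '}':
--                 depth -= 1
--                 if depth == 0:
--                     return j
--             j += 1
--         return len(s) - 1
--
--     # Phase 1: build the event list.
--     events = []
--     i = 0
--     while i < n:
--         c = s[i]
--         if c in '^_' and (i == 0 or s[i-1] != '\\'):
--             i += 1
--             if i < n:
--                 if s[i] == '{':
--                     i = match_braces(s, i) + 1
--                 else:
--                     i += 1
--                 events.append(c)
--             # a trailing script operator emits nothing
--         else:
--             if c not in '^_':
--                 events.append(None)  # reset marker
--             i += 1
--
--     # Phase 2: look for two same-type script events with no reset between.
--     last = None
--     for e in events: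
--         if e is None:
--             last = None
--         elif e == last:
--             return True
--         else:
--             last = e
--     return False
-- ===== Notes on version B (the rewrite author's own statement) =====
-- stated objective: alternative
-- what changed: A's single stateful while-loop (cursor plus last_script carried through the scan, with early return) is split into two phases: a tokenizer that emits a list of script events and reset markers, and a separate pass over that event list that detects two same-type events with no reset between.
import Mathlib
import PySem

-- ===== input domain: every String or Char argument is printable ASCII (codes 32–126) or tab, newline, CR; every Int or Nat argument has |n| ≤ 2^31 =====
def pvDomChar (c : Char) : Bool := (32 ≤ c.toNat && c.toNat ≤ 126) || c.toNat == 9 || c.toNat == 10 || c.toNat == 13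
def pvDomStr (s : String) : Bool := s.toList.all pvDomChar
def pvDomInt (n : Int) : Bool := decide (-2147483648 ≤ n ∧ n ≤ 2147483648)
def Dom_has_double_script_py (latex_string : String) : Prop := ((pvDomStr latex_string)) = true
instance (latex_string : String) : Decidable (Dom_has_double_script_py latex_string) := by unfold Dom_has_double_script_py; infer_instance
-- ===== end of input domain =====

-- B re-decomposes A's single stateful while-loop into two phases: a tokenizer emitting
-- script/reset events, then a separate pass over the event list; same results (alternative).


-- ===== PORT A =====

-- A's match_braces: walk from index `i` counting braces, return the index of the brace
-- closing the first '{'; falls back to len(s)-1 when unbalanced.  The while-loop is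
-- ported with a fuel counter (fuel ≥ s.length - i at every call, so fuel never runs out
-- before the loop's own exit test i < s.length fails).
def pvMbAGo (s : List Char) : Nat → Nat → Int → Nat
  | 0, _, _ => s.length - 1
  | fuel+1, i, count =>
    if h : i < s.length then
      if s[i] = '{' then pvMbAGo s fuel (i+1) (count+1)
      else if s[i] = '}' then
        if count - 1 = 0 then i else pvMbAGo s fuel (i+1) (count-1)
      else pvMbAGo s fuel (i+1) count
    else s.length - 1

def pvMbA (s : List Char) (start : Nat) : Nat := pvMbAGo s (s.length - start) start 0

-- A's main while loop: i is the cursor, last = last_script (script char, content);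
-- the cursor advances by at least 1 each iteration, so fuel = s.length suffices.
def pvLoopA (s : List Char) : Nat → Nat → Option (Char × List Char) → Bool
  | 0, _, _ => false
  | fuel+1, i, last =>
    if h : i < s.length then
      if (s[i] = '^' ∨ s[i] = '_') ∧ (i = 0 ∨ s.getD (i-1) ' ' ≠ '\\') then
        if h2 : i + 1 < s.length then
          if s[i+1] = '{' then
            let e := pvMbA s (i+1)
            let content := PySem.List.slice s (some ((i:Int)+1)) (some ((e:Int)+1))
            match last with
            | some (t, _) => if t = s[i] then true else pvLoopA s fuel (e+1) (some (s[i], content))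
            | none => pvLoopA s fuel (e+1) (some (s[i], content))
          else
            match last with
            | some (t, _) => if t = s[i] then true else pvLoopA s fuel (i+2) (some (s[i], [s[i+1]]))
            | none => pvLoopA s fuel (i+2) (some (s[i], [s[i+1]]))
        else
          pvLoopA s fuel (i+1) last
      else
        if s[i] = '^' ∨ s[i] = '_' then pvLoopA s fuel (i+1) last
        else pvLoopA s fuel (i+1) none
    else false

def has_double_script_py (latex_string : String) : Bool :=
  let s := PySem.Chars.join [] (PySem.Chars.split₀ latex_string.toList)
  pvLoopA s s.length 0 none

-- ===== PORT B =====

-- B's match_braces (explicit while loop over j with a depth counter), fuel-ported likewise.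
def pvMbBGo (s : List Char) : Nat → Nat → Int → Nat
  | 0, _, _ => s.length - 1
  | fuel+1, j, depth =>
    if h : j < s.length then
      if s[j] = '{' then pvMbBGo s fuel (j+1) (depth+1)
      else if s[j] = '}' then
        if depth - 1 = 0 then j else pvMbBGo s fuel (j+1) (depth-1)
      else pvMbBGo s fuel (j+1) depth
    else s.length - 1

def pvMbB (s : List Char) (start : Nat) : Nat := pvMbBGo s (s.length - start) start 0

-- Phase 1: the event list — `some c` for a consumed script operator c, `none` for a reset.
def pvScanB (s : List Char) : Nat → Nat → List (Option Char)
  | 0, _ => []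
  | fuel+1, i =>
    if h : i < s.length then
      if (s[i] = '^' ∨ s[i] = '_') ∧ (i = 0 ∨ s.getD (i-1) ' ' ≠ '\\') then
        if h2 : i + 1 < s.length then
          if s[i+1] = '{' then some s[i] :: pvScanB s fuel (pvMbB s (i+1) + 1)
          else some s[i] :: pvScanB s fuel (i+2)
        else pvScanB s fuel (i+1)  -- trailing operator: no event
      else
        if s[i] = '^' ∨ s[i] = '_' then pvScanB s fuel (i+1)  -- escaped operator: no reset
        else none :: pvScanB s fuel (i+1)
    else []

-- Phase 2: two same-type events with no reset between.
def pvCheckB : List (Option Char) → Option Char → Bool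
  | [], _ => false
  | none :: rest, _ => pvCheckB rest none
  | some c :: rest, last => if some c = last then true else pvCheckB rest (some c)

def has_double_script_py_alt (latex_string : String) : Bool :=
  let s := PySem.Chars.join [] (PySem.Chars.split₀ latex_string.toList)
  pvCheckB (pvScanB s s.length 0) none

-- ===== PRECONDITION & SPEC =====
def Spec_has_double_script_py (latex_string : String) (out : Bool) : Prop := out = has_double_script_py_alt latex_string
instance (latex_string : String) (out : Bool) : Decidable (Spec_has_double_script_py latex_string out) := by unfold Spec_has_double_script_py; infer_instance

-- ===== CLAIM (what is proved, stated in full; the proofs are below) =====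
def Claim_equal_has_double_script_py : Prop := ∀ (latex_string : String), Dom_has_double_script_py latex_string → Spec_has_double_script_py latex_string (has_double_script_py latex_string)

-- ===== LEMMAS AND PROOFS =====

theorem pvMbGo_eq (s : List Char) : ∀ fuel j d, pvMbBGo s fuel j d = pvMbAGo s fuel j d := by
  intro fuel
  induction fuel with
  | zero => intro j d; rfl
  | succ fuel ih =>
    intro j d
    rw [pvMbBGo, pvMbAGo]
    by_cases h : j < s.length
    · rw [dif_pos h, dif_pos h]
      split_ifs <;> first | rfl | exact ih _ _
    · rw [dif_neg h, dif_neg h]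

theorem pvMb_eq (s : List Char) (start : Nat) : pvMbB s start = pvMbA s start :=
  pvMbGo_eq s (s.length - start) start 0

theorem pvLoop_eq (s : List Char) : ∀ fuel i last,
    pvLoopA s fuel i last = pvCheckB (pvScanB s fuel i) (last.map Prod.fst) := by
  intro fuel
  induction fuel with
  | zero => intro i last; rfl
  | succ fuel ih =>
    intro i last
    rw [pvLoopA, pvScanB]
    by_cases h : i < s.length
    · rw [dif_pos h, dif_pos h]
      by_cases hop : (s[i] = '^' ∨ s[i] = '_') ∧ (i = 0 ∨ s.getD (i-1) ' ' ≠ '\\')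
      · rw [if_pos hop, if_pos hop]
        by_cases h2 : i + 1 < s.length
        · rw [dif_pos h2, dif_pos h2]
          by_cases hbr : s[i+1] = '{'
          · rw [if_pos hbr, if_pos hbr, pvMb_eq]
            cases last with
            | none =>
              simp only [Option.map_none]
              rw [pvCheckB, if_neg (by simp)]
              exact ih _ _
            | some p =>
              obtain ⟨t, ct⟩ := p
              simp only [Option.map_some]
              rw [pvCheckB]
              by_cases ht : t = s[i]
              · rw [if_pos ht, if_pos (by rw [ht])]
              · rw [if_neg ht, if_neg (by simp [eq_comm, ht])]
                exact ih _ _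
          · rw [if_neg hbr, if_neg hbr]
            cases last with
            | none =>
              simp only [Option.map_none]
              rw [pvCheckB, if_neg (by simp)]
              exact ih _ _
            | some p =>
              obtain ⟨t, ct⟩ := p
              simp only [Option.map_some]
              rw [pvCheckB]
              by_cases ht : t = s[i]
              · rw [if_pos ht, if_pos (by rw [ht])]
              · rw [if_neg ht, if_neg (by simp [eq_comm, ht])]
                exact ih _ _
        · rw [dif_neg h2, dif_neg h2]
          exact ih _ _
      · rw [if_neg hop, if_neg hop]
        by_cases hc : s[i] = '^' ∨ s[i] = '_'
        · rw [if_pos hc, if_pos hc]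
          exact ih _ _
        · rw [if_neg hc, if_neg hc, pvCheckB]
          simpa using ih (i+1) none
    · rw [dif_neg h, dif_neg h]
      rfl

-- ===== VERDICT (by name: the statement is the Claim_ definition above) =====
theorem has_double_script_py_spec : Claim_equal_has_double_script_py := by
  intro latex_string _
  unfold Spec_has_double_script_py has_double_script_py has_double_script_py_alt
  exact pvLoop_eq _ _ 0 none
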